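-- pv_equiv track=rewrite | github.com/amyrebecca/aggregation | active_weather/preprocessing.py | __lower_bounds__
-- ===== SOURCE A (Python) =====
-- def __lower_bounds__(line):
--     sorted_l = sorted(line, key = lambda l:l[0])
--
--     x_ret = []
--     y_ret = []
--
--     current_x = sorted_l[0][0]
--     current_y = float("inf")
--
--     for x,y in sorted_l:
--         if x != current_x:
--             x_ret.append(current_x)
--             y_ret.append(current_y)
--             current_x = x
--             current_y = float("inf")
--         current_y = min(current_y,y)
--
--     x_ret.append(current_x)
--     y_ret.append(current_y)
--
--     return x_ret,y_ret
-- ===== SOURCE B (Python) =====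
-- def __lower_bounds__(line):
--     mins = {}
--     for x, y in line:
--         mins[x] = y if x not in mins else min(mins[x], y)
--     xs = sorted(mins)
--     return xs, [mins[x] for x in xs]
-- ===== Notes on version B (the rewrite author's own statement) =====
-- stated objective: idiomatic
-- what changed: Replaces the sort-whole-list-then-scan-with-current_x/current_y state machine by a one-pass dict of running minima whose keys are sorted at the end; only the distinct x values are sorted.
import Mathlib
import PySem

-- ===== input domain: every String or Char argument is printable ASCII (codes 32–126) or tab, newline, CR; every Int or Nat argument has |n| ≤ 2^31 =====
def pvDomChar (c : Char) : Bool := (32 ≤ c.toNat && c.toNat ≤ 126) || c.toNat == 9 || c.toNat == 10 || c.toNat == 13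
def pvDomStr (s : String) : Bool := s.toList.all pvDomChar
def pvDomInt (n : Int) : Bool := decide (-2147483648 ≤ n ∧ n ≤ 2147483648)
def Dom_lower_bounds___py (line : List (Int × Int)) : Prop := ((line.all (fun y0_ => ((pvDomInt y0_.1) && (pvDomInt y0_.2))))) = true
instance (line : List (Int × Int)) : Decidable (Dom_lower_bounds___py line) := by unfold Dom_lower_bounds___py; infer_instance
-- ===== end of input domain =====

-- B replaces A's sort-then-scan state machine by a one-pass dict of running minima with
-- sorted keys (idiomatic); on empty input A raises IndexError while B returns ([], []).

-- ===== PORT A =====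
-- current_y = float("inf") is modelled as `none`; `pvMinO cy y` is min(current_y, y).
def pvMinO (cy : Option Int) (y : Int) : Option Int :=
  some (match cy with | none => y | some v => min v y)

-- the for-loop of A, state (x_ret, y_ret, current_x, current_y); the `.getD 0` is never
-- the default under Pre_ (every appended current_y has absorbed at least one y).
def pvLoop : List (Int × Int) → List Int → List Int → Int → Option Int → List Int × List Int
  | [], xr, yr, cx, cy => (xr ++ [cx], yr ++ [(cy.getD 0)])
  | (x, y) :: t, xr, yr, cx, cy =>
      if x ≠ cx then pvLoop t (xr ++ [cx]) (yr ++ [(cy.getD 0)]) x (pvMinO none y)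
      else pvLoop t xr yr cx (pvMinO cy y)

def lower_bounds___py (line : List (Int × Int)) : List Int × List Int :=
  let sorted_l := PySem.List.sorted line (fun l => l.1) false
  match sorted_l with
  | [] => ([], [])  -- Python raises IndexError at sorted_l[0][0]; excluded by Pre_
  | (x0, _) :: _ => pvLoop sorted_l [] [] x0 none

-- ===== PORT B =====
-- mins[x] = y if x not in mins else min(mins[x], y)
def pvStep (d : PySem.Dict Int Int) (p : Int × Int) : PySem.Dict Int Int :=
  d.insert p.1 (match d.get? p.1 with | none => p.2 | some v => min v p.2)

def lower_bounds___py_alt (line : List (Int × Int)) : List Int × List Int :=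
  let mins := line.foldl pvStep PySem.Dict.empty
  let xs := PySem.List.sorted mins.keys (fun k => k) false
  (xs, xs.map (fun x => mins.getD x 0))

-- ===== PRECONDITION & SPEC =====
-- Pre_ excludes only the empty list, on which A raises IndexError.
def Pre_lower_bounds___py (line : List (Int × Int)) : Prop := line ≠ []
instance (line : List (Int × Int)) : Decidable (Pre_lower_bounds___py line) := by
  unfold Pre_lower_bounds___py; infer_instance
def pvWitness_lower_bounds___py : (List (Int × Int)) := [((2 : Int), (3 : Int)), (1, 5), (2, 1)]

def Spec_lower_bounds___py (line : List (Int × Int)) (out : List Int × List Int) : Prop :=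
  out = lower_bounds___py_alt line
instance (line : List (Int × Int)) (out : List Int × List Int) : Decidable (Spec_lower_bounds___py line out) := by
  unfold Spec_lower_bounds___py; infer_instance

-- ===== CLAIM (what is proved, stated in full; the proofs are below) =====
def Claim_equal_lower_bounds___py : Prop := ∀ (line : List (Int × Int)), Dom_lower_bounds___py line → Pre_lower_bounds___py line → Spec_lower_bounds___py line (lower_bounds___py line)

-- ===== LEMMAS AND PROOFS =====

-- accumulator-free form of A's loop
def pvRuns : List (Int × Int) → Int → Option Int → List Int × List Int
  | [], cx, cy => ([cx], [cy.getD 0])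
  | (x, y) :: t, cx, cy =>
      if x ≠ cx then
        ((pvRuns t x (pvMinO none y)).1.cons cx, (pvRuns t x (pvMinO none y)).2.cons (cy.getD 0))
      else pvRuns t cx (pvMinO cy y)

lemma pvLoop_eq (s : List (Int × Int)) : ∀ xr yr cx cy,
    pvLoop s xr yr cx cy = (xr ++ (pvRuns s cx cy).1, yr ++ (pvRuns s cx cy).2) := by
  induction s with
  | nil => intro xr yr cx cy; simp [pvLoop, pvRuns]
  | cons p t ih =>
    obtain ⟨x, y⟩ := p
    intro xr yr cx cy
    by_cases h : x = cx
    · simp [pvLoop, pvRuns, h, ih]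
    · simp [pvLoop, pvRuns, h, ih]

-- dedup of consecutive duplicates
def pvCd : List Int → List Int
  | [] => []
  | [x] => [x]
  | x :: y :: t => if x = y then pvCd (y :: t) else x :: pvCd (y :: t)

lemma mem_pvCd (l : List Int) (a : Int) : a ∈ pvCd l ↔ a ∈ l := by
  induction l with
  | nil => simp [pvCd]
  | cons x t ih =>
    cases t with
    | nil => simp [pvCd]
    | cons y u =>
      by_cases h : x = y
      · simp only [pvCd, if_pos h]
        rw [ih]
        simp [h]
      · simp only [pvCd, if_neg h]
        simp [ih]

lemma pvCd_pairwise_lt (l : List Int) (h : l.Pairwise (· ≤ ·)) :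
    (pvCd l).Pairwise (· < ·) := by
  induction l with
  | nil => simp [pvCd]
  | cons x t ih =>
    cases t with
    | nil => simp [pvCd]
    | cons y u =>
      rcases List.pairwise_cons.1 h with ⟨hx, ht⟩
      by_cases hxy : x = y
      · simpa [pvCd, hxy] using ih ht
      · simp only [pvCd, if_neg hxy]
        refine List.pairwise_cons.2 ⟨?_, ih ht⟩
        intro b hb
        rw [mem_pvCd] at hb
        have hyb : y ≤ b := by
          rcases List.mem_cons.1 hb with hb | hb
          · exact hb ▸ le_rfl
          · exact (List.pairwise_cons.1 ht).1 b hb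
        exact lt_of_lt_of_le (lt_of_le_of_ne (hx y (by simp)) hxy) hyb

lemma pvCd_cons (x : Int) (l : List Int) (h : l.Pairwise (· ≤ ·)) (hge : ∀ a ∈ l, x ≤ a) :
    pvCd (x :: l) = x :: pvCd (l.filter (fun a => a ≠ x)) := by
  induction l with
  | nil => simp [pvCd]
  | cons y t ih =>
    rcases List.pairwise_cons.1 h with ⟨hy, ht⟩
    by_cases hxy : x = y
    · subst hxy
      have step : pvCd (x :: x :: t) = pvCd (x :: t) := by simp [pvCd]
      rw [step, ih ht hy]
      congr 2
      simp
    · have hxlt : x < y := lt_of_le_of_ne (hge y (by simp)) hxy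
      have htne : ∀ a ∈ t, a ≠ x := fun a ha => ne_of_gt (lt_of_lt_of_le hxlt (hy a ha))
      have hf : (y :: t).filter (fun a => a ≠ x) = y :: t := by
        rw [List.filter_cons_of_pos (by simp [Ne.symm hxy])]
        rw [List.filter_eq_self.2 (fun a ha => by simp [htne a ha])]
      rw [hf]
      simp [pvCd, hxy]

-- the y-values grouped under key k, and the minimum A/B compute for that key
def pvGrp (s : List (Int × Int)) (k : Int) : List Int :=
  (s.filter (fun p => p.1 == k)).map (fun p => p.2)

def pvVal (s : List (Int × Int)) (k : Int) : Int :=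
  ((pvGrp s k).foldl pvMinO none).getD 0

lemma pvRuns_eq (s : List (Int × Int)) : ∀ cx cy,
    (∀ p ∈ s, cx ≤ p.1) → (s.map Prod.fst).Pairwise (· ≤ ·) →
    pvRuns s cx cy =
      (cx :: pvCd (((s.map Prod.fst).filter (fun a => a ≠ cx))),
       ((pvGrp s cx).foldl pvMinO cy).getD 0 ::
         (pvCd (((s.map Prod.fst).filter (fun a => a ≠ cx)))).map (pvVal s)) := by
  induction s with
  | nil => intro cx cy _ _; simp [pvRuns, pvGrp, pvCd]
  | cons p t ih =>
    obtain ⟨x, y⟩ := p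
    intro cx cy hge hsort
    rw [List.map_cons] at hsort
    rcases List.pairwise_cons.1 hsort with ⟨hxle, htsort⟩
    have hge' : ∀ p ∈ t, x ≤ p.1 := fun p hp => hxle p.1 (List.mem_map_of_mem hp)
    by_cases h : x = cx
    · subst h
      have hstep : pvRuns ((x, y) :: t) x cy = pvRuns t x (pvMinO cy y) := by simp [pvRuns]
      rw [hstep, ih x (pvMinO cy y) hge' htsort]
      have hfeq : (((x, y) :: t).map Prod.fst).filter (fun a => a ≠ x)
          = (t.map Prod.fst).filter (fun a => a ≠ x) := by simp
      have hgrp : pvGrp ((x, y) :: t) x = y :: pvGrp t x := by simp [pvGrp]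
      have hvals : ∀ k ∈ pvCd ((t.map Prod.fst).filter (fun a => a ≠ x)),
          pvVal t k = pvVal ((x, y) :: t) k := by
        intro k hk
        rw [mem_pvCd] at hk
        have hkx : k ≠ x := by simpa using (List.mem_filter.1 hk).2
        simp [pvVal, pvGrp, hkx.symm]
      rw [hfeq, hgrp]
      refine Prod.ext rfl ?_
      refine congrArg₂ _ (by simp [List.foldl_cons]) ?_
      exact List.map_congr_left hvals
    · have hcxlt : cx < x := lt_of_le_of_ne (hge (x, y) (by simp)) (Ne.symm h)
      have hstep : pvRuns ((x, y) :: t) cx cy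
          = ((pvRuns t x (pvMinO none y)).1.cons cx, (pvRuns t x (pvMinO none y)).2.cons (cy.getD 0)) := by
        simp [pvRuns, h]
      rw [hstep, ih x (pvMinO none y) hge' htsort]
      have htnecx : ∀ a ∈ t.map Prod.fst, a ≠ cx :=
        fun a ha => ne_of_gt (lt_of_lt_of_le hcxlt (hxle a ha))
      have hfcx : (((x, y) :: t).map Prod.fst).filter (fun a => a ≠ cx) = x :: t.map Prod.fst := by
        rw [List.map_cons, List.filter_cons_of_pos (by simp [h])]
        rw [List.filter_eq_self.2 (fun a ha => by simp [htnecx a ha])]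
      have hcd : pvCd (x :: t.map Prod.fst) = x :: pvCd ((t.map Prod.fst).filter (fun a => a ≠ x)) :=
        pvCd_cons x (t.map Prod.fst) htsort hxle
      have hgrpcx : pvGrp ((x, y) :: t) cx = [] := by
        simp only [pvGrp, List.filter_cons]
        rw [if_neg (by simp [h])]
        rw [List.filter_eq_nil_iff.2 (fun p hp => by simp [htnecx p.1 (List.mem_map_of_mem hp)])]
        simp
      have hgrpx : pvGrp ((x, y) :: t) x = y :: pvGrp t x := by simp [pvGrp]
      have hvals : ∀ k ∈ pvCd ((t.map Prod.fst).filter (fun a => a ≠ x)),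
          pvVal t k = pvVal ((x, y) :: t) k := by
        intro k hk
        rw [mem_pvCd] at hk
        have hkx : k ≠ x := by simpa using (List.mem_filter.1 hk).2
        simp [pvVal, pvGrp, hkx.symm]
      rw [hfcx, hcd]
      refine Prod.ext rfl ?_
      refine congrArg₂ _ (by simp [hgrpcx]) ?_
      refine congrArg₂ _ (by simp [pvVal, hgrpx, List.foldl_cons]) ?_
      exact List.map_congr_left hvals

lemma get?_fold (l : List (Int × Int)) : ∀ (d : PySem.Dict Int Int) (k : Int),
    (l.foldl pvStep d).get? k = (pvGrp l k).foldl pvMinO (d.get? k) := by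
  induction l with
  | nil => intro d k; simp [pvGrp]
  | cons p t ih =>
    obtain ⟨x, y⟩ := p
    intro d k
    rw [List.foldl_cons, ih]
    by_cases h : k = x
    · subst h
      have hg : pvGrp ((k, y) :: t) k = y :: pvGrp t k := by simp [pvGrp]
      have hmm : (some (match d.get? k with | none => y | some v => min v y) : Option Int)
          = pvMinO (d.get? k) y := by cases d.get? k <;> rfl
      rw [hg, List.foldl_cons]
      rw [show pvStep d (k, y) = d.insert k (match d.get? k with | none => y | some v => min v y) from rfl]
      rw [PySem.Dict.get?_insert_self, hmm]
    · have hg : pvGrp ((x, y) :: t) k = pvGrp t k := by simp [pvGrp, Ne.symm h]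
      rw [hg]
      rw [show pvStep d (x, y) = d.insert x (match d.get? x with | none => y | some v => min v y) from rfl]
      rw [PySem.Dict.get?_insert_of_ne _ _ h]

lemma pvMinO_rcomm : ∀ (o : Option Int) (a b : Int), pvMinO (pvMinO o a) b = pvMinO (pvMinO o b) a := by
  intro o a b
  cases o <;> simp [pvMinO, min_comm, min_left_comm]

lemma pvMain (line : List (Int × Int)) (hne : line ≠ []) :
    lower_bounds___py line = lower_bounds___py_alt line := by
  have hsne : PySem.List.sorted line (fun l => l.1) false ≠ [] := by
    simpa [PySem.List.sorted_eq_nil_iff] using hne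
  obtain ⟨p, t, hst⟩ := List.exists_cons_of_ne_nil hsne
  obtain ⟨x0, y0⟩ := p
  have hsort : (((x0, y0) :: t).map Prod.fst).Pairwise (· ≤ ·) := by
    have h0 := PySem.List.sorted_map_key_pairwise line (fun l => l.1)
    rw [hst] at h0
    exact h0
  have hperm : ((x0, y0) :: t).Perm line := by
    have h0 := PySem.List.sorted_perm line (fun l => l.1) false
    rw [hst] at h0
    exact h0
  rw [List.map_cons] at hsort
  rcases List.pairwise_cons.1 hsort with ⟨hxle, htsort⟩
  have hge : ∀ q ∈ (x0, y0) :: t, x0 ≤ q.1 := by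
    intro q hq
    rcases List.mem_cons.1 hq with hq | hq
    · exact hq ▸ le_rfl
    · exact hxle q.1 (List.mem_map_of_mem hq)
  have hsort' : (((x0, y0) :: t).map Prod.fst).Pairwise (· ≤ ·) := by
    rw [List.map_cons]; exact List.pairwise_cons.2 ⟨hxle, htsort⟩
  -- reduce both sides
  simp only [lower_bounds___py, lower_bounds___py_alt]
  rw [hst]
  simp only []
  set mins := line.foldl pvStep PySem.Dict.empty with hm
  -- the common strictly increasing key list
  have hDeq : pvCd (((x0, y0) :: t).map Prod.fst)
      = x0 :: pvCd (((((x0, y0) :: t).map Prod.fst)).filter (fun a => a ≠ x0)) := by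
    rw [List.map_cons, pvCd_cons x0 (t.map Prod.fst) htsort hxle]
    congr 2
    simp
  have hkeys : mins.keys = PySem.Set.update ((PySem.Dict.empty : PySem.Dict Int Int)).keys
      (line.map (fun p : Int × Int => p.1)) :=
    PySem.Dict.keys_foldl_insert_key line (fun p : Int × Int => p.1)
      (fun d p => match d.get? p.1 with | none => p.2 | some v => min v p.2) PySem.Dict.empty
  have hnd : mins.keys.Nodup :=
    PySem.Dict.nodup_keys_foldl_insert_key line (fun p : Int × Int => p.1)
      (fun d p => match d.get? p.1 with | none => p.2 | some v => min v p.2) PySem.Dict.empty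
      List.nodup_nil
  have hDlt : (pvCd (((x0, y0) :: t).map Prod.fst)).Pairwise (· < ·) := pvCd_pairwise_lt _ hsort'
  have hDperm : (pvCd (((x0, y0) :: t).map Prod.fst)).Perm mins.keys := by
    rw [List.perm_ext_iff_of_nodup (hDlt.imp (fun h => ne_of_lt h)) hnd]
    intro a
    rw [mem_pvCd, hkeys, PySem.Set.mem_update]
    have : a ∈ line.map (fun p : Int × Int => p.1) ↔ a ∈ ((x0, y0) :: t).map Prod.fst :=
      ((hperm.map Prod.fst).mem_iff).symm
    rw [this]
    simp [PySem.Dict.empty, PySem.Dict.keys]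
  have hxs : PySem.List.sorted mins.keys (fun k => k) false = pvCd (((x0, y0) :: t).map Prod.fst) :=
    PySem.List.sorted_eq_of_perm_of_pairwise_lt mins.keys _ (fun k => k) hDperm hDlt
  have hvals : ∀ k ∈ pvCd (((x0, y0) :: t).map Prod.fst),
      mins.getD k 0 = pvVal ((x0, y0) :: t) k := by
    intro k hk
    have hg : mins.get? k = (pvGrp line k).foldl pvMinO none := by
      rw [hm, get?_fold]
      rfl
    have hgperm : (pvGrp ((x0, y0) :: t) k).Perm (pvGrp line k) := by
      unfold pvGrp
      exact (hperm.filter (fun p => p.1 == k)).map (fun p => p.2)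
    have hfold : (pvGrp ((x0, y0) :: t) k).foldl pvMinO none = (pvGrp line k).foldl pvMinO none :=
      @List.Perm.foldl_eq _ _ pvMinO _ _ ⟨pvMinO_rcomm⟩ hgperm none
    show (mins.get? k).getD 0 = pvVal ((x0, y0) :: t) k
    rw [hg, pvVal, hfold]
  rw [hxs]
  rw [show pvLoop ((x0, y0) :: t) [] [] x0 none
      = ([] ++ (pvRuns ((x0, y0) :: t) x0 none).1, [] ++ (pvRuns ((x0, y0) :: t) x0 none).2)
    from pvLoop_eq _ [] [] x0 none]
  rw [pvRuns_eq ((x0, y0) :: t) x0 none hge hsort']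
  rw [show (pvCd (((x0, y0) :: t).map Prod.fst)).map (fun x => mins.getD x 0)
      = (pvCd (((x0, y0) :: t).map Prod.fst)).map (pvVal ((x0, y0) :: t))
    from List.map_congr_left hvals]
  rw [hDeq]
  simp [pvVal]

-- ===== VERDICT (by name: the statement is the Claim_ definition above) =====
theorem lower_bounds___py_spec : Claim_equal_lower_bounds___py := by
  intro line _ hpre
  unfold Spec_lower_bounds___py
  exact pvMain line hpre
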